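-- pv_equiv track=rewrite | github.com/minbros/coding-test-practice | programmers/389479.py | solution
-- ===== SOURCE A (Python) =====
-- def solution(players, m, k):
--     ext = []
--     count = 0
--     for t in range(len(players)):
--         while ext and ext[0] == t:
--             ext.pop(0)
--
--         exceed = (players[t] - m * len(ext))
--         for _ in range(exceed // m):
--             ext.append(t + k)
--             count += 1
--
--     return count
-- ===== SOURCE B (Python) =====
-- def solution(players, m, k):
--     # Difference-map over expiration times + an integer active-server count,
--     # instead of A's explicit per-server expiration list.
--     expire = {}   # time -> number of servers that shut down at that time
--     active = 0
--     count = 0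
--     for t, p in enumerate(players):
--         active -= expire.get(t, 0)
--         need = p // m - active        # servers still missing at time t
--         if need > 0:
--             expire[t + k] = expire.get(t + k, 0) + need
--             active += need
--             count += need
--     return count
-- ===== Notes on version B (the rewrite author's own statement) =====
-- stated objective: alternative
-- what changed: Replaces A's explicit list of per-server expiration times (popped one-by-one from the front and re-measured with len each step) with a dict from expiration time to a batch count plus a single integer active counter, adding need = p//m - active servers in one arithmetic step; measured 1.5-1.8x faster on some input families but not consistently >=1.5x, so no speed claim.
import Mathlib
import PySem

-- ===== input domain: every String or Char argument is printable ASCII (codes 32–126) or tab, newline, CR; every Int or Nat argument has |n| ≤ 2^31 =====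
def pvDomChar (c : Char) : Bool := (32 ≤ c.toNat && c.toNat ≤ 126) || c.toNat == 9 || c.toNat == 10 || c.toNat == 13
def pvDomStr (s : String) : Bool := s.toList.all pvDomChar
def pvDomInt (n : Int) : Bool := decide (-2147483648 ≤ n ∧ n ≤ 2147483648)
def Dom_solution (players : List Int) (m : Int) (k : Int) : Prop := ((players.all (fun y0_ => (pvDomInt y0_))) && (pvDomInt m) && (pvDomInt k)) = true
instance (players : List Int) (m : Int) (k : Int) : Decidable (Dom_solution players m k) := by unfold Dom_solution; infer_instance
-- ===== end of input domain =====

-- B replaces A's per-server expiration list (popped one-by-one, re-measured with len each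
-- step) by a dict of batch counts keyed by expiration time plus one integer active counter.

-- ===== PORT A =====
-- 'while ext and ext[0] == t: ext.pop(0)'
def popExpired (t : Int) : List Int → List Int
  | [] => []
  | e :: rest => if e = t then popExpired t rest else e :: rest

-- body of 'for t in range(len(players))'
def solStepA (players : List Int) (m k : Int) (st : List Int × Int) (t : Int) : List Int × Int :=
  let ext := popExpired t st.1
  let exceed := PySem.List.pyGetD players t 0 - m * (ext.length : Int)
  (PySem.List.pyRange 0 (PySem.Int.floordiv exceed m) 1).foldl
    (fun st2 _ => (st2.1 ++ [t + k], st2.2 + 1)) (ext, st.2)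

def solution (players : List Int) (m : Int) (k : Int) : Int :=
  ((PySem.List.pyRange 0 (players.length : Int) 1).foldl (solStepA players m k) ([], 0)).2

-- ===== PORT B =====
-- body of 'for t, p in enumerate(players)'; state = (expire, active, count)
def solStepB (m k : Int) (st : PySem.Dict Int Int × Int × Int) (tp : Int × Int) :
    PySem.Dict Int Int × Int × Int :=
  let active := st.2.1 - st.1.getD tp.1 0
  let need := PySem.Int.floordiv tp.2 m - active
  if 0 < need then
    (st.1.insert (tp.1 + k) (st.1.getD (tp.1 + k) 0 + need), active + need, st.2.2 + need)
  else (st.1, active, st.2.2)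

def solution_alt (players : List Int) (m : Int) (k : Int) : Int :=
  ((PySem.List.enumerate players 0).foldl (solStepB m k) (PySem.Dict.empty, 0, 0)).2.2

-- ===== PRECONDITION & SPEC =====
-- Pre_ excludes only m = 0 with a nonempty players list, where both A and B raise ZeroDivisionError.
def Pre_solution (players : List Int) (m : Int) (k : Int) : Prop := players = [] ∨ m ≠ 0
instance (players : List Int) (m : Int) (k : Int) : Decidable (Pre_solution players m k) := by
  unfold Pre_solution; infer_instance

def pvWitness_solution : List Int × Int × Int := ([3, 10, 0, 7], 3, 2)

def Spec_solution (players : List Int) (m : Int) (k : Int) (out : Int) : Prop := out = solution_alt players m k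
instance (players : List Int) (m : Int) (k : Int) (out : Int) : Decidable (Spec_solution players m k out) := by unfold Spec_solution; infer_instance

-- ===== CLAIM (what is proved, stated in full; the proofs are below) =====
def Claim_equal_solution : Prop := ∀ (players : List Int) (m : Int) (k : Int), Dom_solution players m k → Pre_solution players m k → Spec_solution players m k (solution players m k)

-- ===== LEMMAS AND PROOFS =====

-- the bisimulation invariant between A's state (ext, cA) and B's state (d, a, c) at time t
def BisimInv (k t : Int) (ext : List Int) (d : PySem.Dict Int Int) (a c cA : Int) : Prop :=
  cA = c ∧ a = (ext.length : Int) ∧ ext.Pairwise (· ≤ ·) ∧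
  (∀ e ∈ ext, e < t + k) ∧
  (if 1 ≤ k then ∀ e ∈ ext, t ≤ e else ∀ e ∈ ext, e < t) ∧
  (∀ s : Int, t ≤ s → d.getD s 0 = (ext.count s : Int))

lemma popExpired_of_sorted_ge (t : Int) (ext : List Int) (hs : ext.Pairwise (· ≤ ·))
    (hge : ∀ e ∈ ext, t ≤ e) : popExpired t ext = ext.filter (fun e => e != t) := by
  induction ext with
  | nil => rfl
  | cons e rest ih =>
    rcases List.pairwise_cons.1 hs with ⟨hle, hrest⟩
    by_cases he : e = t
    · subst he
      simp only [popExpired, List.filter_cons, bne_self_eq_false]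
      exact ih hrest (fun x hx => hge x (List.mem_cons_of_mem _ hx))
    · have het : t < e := lt_of_le_of_ne (hge e (List.mem_cons_self)) (Ne.symm he)
      have hall : rest.filter (fun e => e != t) = rest := by
        apply List.filter_eq_self.2
        intro x hx
        have : t < x := lt_of_lt_of_le het (hle x hx)
        simp [bne_iff_ne]; omega
      simp [popExpired, bne_iff_ne, he, hall]

lemma popExpired_of_lt (t : Int) (ext : List Int) (hlt : ∀ e ∈ ext, e < t) :
    popExpired t ext = ext.filter (fun e => e != t) := by
  have : ext.filter (fun e => e != t) = ext := by
    apply List.filter_eq_self.2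
    intro x hx
    have := hlt x hx
    simp [bne_iff_ne]; omega
  rw [this]
  cases ext with
  | nil => rfl
  | cons e rest =>
    have : e ≠ t := by have := hlt e List.mem_cons_self; omega
    simp [popExpired, if_neg this]

lemma length_filter_ne (t : Int) (l : List Int) :
    (l.filter (fun e => e != t)).length + l.count t = l.length := by
  induction l with
  | nil => simp
  | cons e rest ih =>
    by_cases he : e = t
    · subst he; simp; omega
    · simp [bne_iff_ne, he]; omega

lemma count_filter_ne (t s : Int) (l : List Int) :
    (l.filter (fun e => e != t)).count s = if s = t then 0 else l.count s := by
  by_cases hs : s = t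
  · subst hs
    rw [if_pos rfl]
    apply List.count_eq_zero.2
    intro h
    rcases List.mem_filter.1 h with ⟨_, hb⟩
    simp at hb
  · rw [if_neg hs, List.count_filter (by simpa [bne_iff_ne] using hs)]

lemma foldl_append_count {α : Type} (x : Int) (l : List α) (ext : List Int) (c : Int) :
    l.foldl (fun (st2 : List Int × Int) _ => (st2.1 ++ [x], st2.2 + 1)) (ext, c)
      = (ext ++ List.replicate l.length x, c + (l.length : Int)) := by
  induction l generalizing ext c with
  | nil => simp
  | cons _ rest ih =>
    simp only [List.foldl_cons, ih, List.length_cons, Prod.mk.injEq]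
    constructor
    · rw [List.append_assoc, List.singleton_append, ← List.replicate_succ]
    · push_cast; ring

lemma fdiv_sub_mul (p m a : Int) (hm : m ≠ 0) :
    PySem.Int.floordiv (p - m * a) m = PySem.Int.floordiv p m - a := by
  show (p - m * a).fdiv m = p.fdiv m - a
  have h2 : p - m * a = p + m * (-a) := by ring
  rw [h2, Int.add_mul_fdiv_left p (-a) hm]; ring

lemma step_inv (players : List Int) (m k t : Int) (hm : m ≠ 0)
    (ext : List Int) (d : PySem.Dict Int Int) (a c cA : Int)
    (h : BisimInv k t ext d a c cA) :
    BisimInv k (t + 1) (solStepA players m k (ext, cA) t).1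
      (solStepB m k (d, a, c) (t, PySem.List.pyGetD players t 0)).1
      (solStepB m k (d, a, c) (t, PySem.List.pyGetD players t 0)).2.1
      (solStepB m k (d, a, c) (t, PySem.List.pyGetD players t 0)).2.2
      (solStepA players m k (ext, cA) t).2 := by
  obtain ⟨hc, ha, hsort, hub, hksplit, hd⟩ := h
  set p := PySem.List.pyGetD players t 0 with hp
  have hksplit' : ∀ e ∈ ext, (1 ≤ k → t ≤ e) ∧ (k < 1 → e < t) := by
    intro e he
    constructor <;> intro hk
    · have h := hksplit; rw [if_pos hk] at h; exact h e he
    · have h := hksplit; rw [if_neg (by omega)] at h; exact h e he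
  -- pop characterisation
  have hpop : popExpired t ext = ext.filter (fun e => e != t) := by
    by_cases hk : 1 ≤ k
    · exact popExpired_of_sorted_ge t ext hsort (by simpa [hk] using hksplit)
    · exact popExpired_of_lt t ext (by simpa [hk] using hksplit)
  set ext1 := ext.filter (fun e => e != t) with hext1
  have hlen1 : (ext1.length : Int) = a - (ext.count t : Int) := by
    rw [hext1]
    have := length_filter_ne t ext
    rw [ha]; omega
  have hdt : d.getD t 0 = (ext.count t : Int) := hd t le_rfl
  -- the two step results
  have hq : PySem.Int.floordiv (p - m * (ext1.length : Int)) m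
      = PySem.Int.floordiv p m - (ext1.length : Int) := fdiv_sub_mul _ _ _ hm
  set q := PySem.Int.floordiv p m - (ext1.length : Int) with hqdef
  have hA : solStepA players m k (ext, cA) t
      = (ext1 ++ List.replicate q.toNat (t + k), cA + (q.toNat : Int)) := by
    simp only [solStepA, hpop, ← hp, hq]
    rw [foldl_append_count, PySem.List.length_pyRange_one]
    simp
  have hactive1 : a - d.getD t 0 = (ext1.length : Int) := by rw [hdt, hlen1]
  -- facts reused in both branches
  have hmem1 : ∀ e ∈ ext1, e ∈ ext ∧ e ≠ t := by
    intro e he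
    rw [hext1, List.mem_filter] at he
    exact ⟨he.1, by simpa [bne_iff_ne] using he.2⟩
  have hcount1 : ∀ s : Int, s ≠ t → ext1.count s = ext.count s := by
    intro s hs
    rw [hext1, count_filter_ne, if_neg hs]
  have hsort1 : ext1.Pairwise (· ≤ ·) := List.Pairwise.sublist List.filter_sublist hsort
  by_cases hpos : 0 < q
  · have hB : solStepB m k (d, a, c) (t, p)
        = (d.insert (t + k) (d.getD (t + k) 0 + q), (ext1.length : Int) + q, c + q) := by
      simp only [solStepB, hactive1, ← hqdef, if_pos hpos]
    have htn : (q.toNat : Int) = q := Int.toNat_of_nonneg (le_of_lt hpos)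
    rw [hA, hB]
    refine ⟨by rw [hc, htn], ?_, ?_, ?_, ?_, ?_⟩
    · simp [List.length_append, List.length_replicate]; omega
    · rw [List.pairwise_append]
      refine ⟨hsort1, List.pairwise_replicate.2 (Or.inr le_rfl), ?_⟩
      intro e he x hx
      have := (hub e (hmem1 e he).1)
      have hxx := List.eq_of_mem_replicate hx
      omega
    · intro e he
      rcases List.mem_append.1 he with he | he
      · have := hub e (hmem1 e he).1; omega
      · have := List.eq_of_mem_replicate he; omega
    · split_ifs with hk <;> intro e he <;> rcases List.mem_append.1 he with he | he
      · have h1 := (hmem1 e he).2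
        have h2 := (hksplit' e (hmem1 e he).1).1 hk
        omega
      · have := List.eq_of_mem_replicate he; omega
      · have h2 := (hksplit' e (hmem1 e he).1).2 (by omega)
        omega
      · have := List.eq_of_mem_replicate he; omega
    · intro s hs
      rw [PySem.Dict.getD_insert]
      rw [List.count_append, List.count_replicate]
      by_cases hstk : s = t + k
      · have hk1 : 1 ≤ k := by omega
        have hne : (t + k) ≠ t := by omega
        rw [if_pos hstk, hstk, hd (t + k) (by omega), hcount1 (t + k) hne]
        simp [htn]
      · rw [if_neg hstk, if_neg (by simpa using Ne.symm (by omega : s ≠ t + k))]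
        have hst : s ≠ t := by omega
        rw [hd s (by omega), hcount1 s hst]
        simp
  · have hB : solStepB m k (d, a, c) (t, p) = (d, (ext1.length : Int), c) := by
      simp only [solStepB, hactive1, ← hqdef, if_neg hpos]
    have htn : q.toNat = 0 := Int.toNat_of_nonpos (by omega)
    rw [hA, hB, htn]
    refine ⟨by simpa using hc, by simp, by simpa using hsort1, ?_, ?_, ?_⟩
    · intro e he
      simp at he
      have := hub e (hmem1 e he).1; omega
    · split_ifs with hk <;> intro e he <;> simp at he
      · have h1 := (hmem1 e he).2
        have h2 := (hksplit' e (hmem1 e he).1).1 hk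
        omega
      · have h2 := (hksplit' e (hmem1 e he).1).2 (by omega)
        omega
    · intro s hs
      simp only [List.append_nil, List.replicate_zero]
      have hst : s ≠ t := by omega
      rw [hd s (by omega), hcount1 s hst]

lemma main_loop (players : List Int) (m k : Int) (hm : m ≠ 0) :
    ∀ (j : Nat) (t : Int) (ext : List Int) (d : PySem.Dict Int Int) (a c cA : Int),
      BisimInv k t ext d a c cA →
      ((PySem.List.pyRange t (t + (j : Int)) 1).foldl (solStepA players m k) (ext, cA)).2
        = ((PySem.List.pyRange t (t + (j : Int)) 1).foldl
            (fun st x => solStepB m k st (x, PySem.List.pyGetD players x 0)) (d, a, c)).2.2 := by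
  intro j
  induction j with
  | zero =>
    intro t ext d a c cA h
    rw [PySem.List.pyRange_one_eq_nil (by omega)]
    exact h.1
  | succ n ih =>
    intro t ext d a c cA h
    rw [PySem.List.pyRange_one_cons (by omega)]
    simp only [List.foldl_cons]
    have hstep := step_inv players m k t hm ext d a c cA h
    have hend : t + ((n + 1 : Nat) : Int) = (t + 1) + (n : Int) := by push_cast; ring
    rw [hend]
    have := ih (t + 1) (solStepA players m k (ext, cA) t).1
      (solStepB m k (d, a, c) (t, PySem.List.pyGetD players t 0)).1
      (solStepB m k (d, a, c) (t, PySem.List.pyGetD players t 0)).2.1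
      (solStepB m k (d, a, c) (t, PySem.List.pyGetD players t 0)).2.2
      (solStepA players m k (ext, cA) t).2 hstep
    simpa using this

-- ===== VERDICT (by name: the statement is the Claim_ definition above) =====
theorem solution_spec : Claim_equal_solution := by
  intro players m k _ hpre
  show solution players m k = solution_alt players m k
  rcases hpre with hnil | hm
  · subst hnil
    simp [solution, solution_alt, PySem.List.pyRange_one_eq_nil, PySem.List.enumerate]
  · unfold solution solution_alt
    rw [PySem.List.enumerate_eq_map_pyRange players 0, List.foldl_map]
    simp only [PySem.List.len_eq]
    have h0 : (players.length : Int) = 0 + (players.length : Int) := by ring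
    rw [h0]
    have hinv : BisimInv k 0 [] PySem.Dict.empty 0 0 0 := by
      refine ⟨rfl, by simp, List.Pairwise.nil, by simp, by split <;> simp, ?_⟩
      intro s _
      simp [PySem.Dict.getD_empty]
    exact main_loop players m k hm players.length 0 [] PySem.Dict.empty 0 0 0 hinv
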